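-- pv_equiv track=rewrite | github.com/RobotTender/bartender-robot | src/backend/task_backend_node.py | _select_state_topic
-- ===== SOURCE A (Python) =====
-- ROBOT_ID = "dsr01"
--
-- def _select_state_topic(topic_map):
--     state_topics = [t for t, types in topic_map.items() if "dsr_msgs2/msg/RobotState" in types]
--     if not state_topics:
--         return None
--     preferred = [t for t in state_topics if f"/{ROBOT_ID}/" in t]
--     preferred = preferred or state_topics
--     canonical = [t for t in preferred if t.endswith("/state")]
--     return sorted(canonical or preferred)[0]
-- ===== SOURCE B (Python) =====
-- ROBOT_ID = "dsr01"
--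
-- def _better(t, best):
--     pt, pb = f"/{ROBOT_ID}/" in t, f"/{ROBOT_ID}/" in best
--     if pt != pb:
--         return pt
--     ct, cb = t.endswith("/state"), best.endswith("/state")
--     if ct != cb:
--         return ct
--     return t < best
--
-- def _select_state_topic(topic_map):
--     best = None
--     for t, types in topic_map.items():
--         if "dsr_msgs2/msg/RobotState" in types and (best is None or _better(t, best)):
--             best = t
--     return best
-- ===== Notes on version B (the rewrite author's own statement) =====
-- stated objective: alternative
-- what changed: Replaced A's staged filter/fallback lists plus sort-and-take-head with a single fold over the items that keeps the running argmin under an explicit lexicographic priority (robot-id match, '/state' suffix, topic name).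
import Mathlib
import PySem

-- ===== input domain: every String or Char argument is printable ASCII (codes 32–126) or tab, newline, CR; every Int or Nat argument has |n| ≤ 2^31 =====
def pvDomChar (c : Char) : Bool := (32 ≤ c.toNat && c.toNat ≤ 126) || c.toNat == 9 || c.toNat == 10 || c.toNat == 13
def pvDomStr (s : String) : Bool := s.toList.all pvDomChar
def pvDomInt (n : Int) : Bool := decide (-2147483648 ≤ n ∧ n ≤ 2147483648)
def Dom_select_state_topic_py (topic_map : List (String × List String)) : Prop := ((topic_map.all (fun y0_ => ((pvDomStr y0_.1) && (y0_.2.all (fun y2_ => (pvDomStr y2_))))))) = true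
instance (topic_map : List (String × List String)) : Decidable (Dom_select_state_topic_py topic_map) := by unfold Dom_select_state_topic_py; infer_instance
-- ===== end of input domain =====

-- B replaces A's staged filter/fallback/sort pipeline by a single pass that keeps the
-- argmin under the lexicographic priority (robot-id match, '/state' suffix, name); same results (objective: alternative).

-- ===== PORT A =====
-- literal port of A: dict.items(), staged filters, `or` fallbacks, sorted(...)[0]
def select_state_topic_py (topic_map : List (String × List String)) : Option String :=
  let state_topics :=
    ((PySem.Dict.ofList topic_map).items.filter
      (fun p => p.2.contains "dsr_msgs2/msg/RobotState")).map Prod.fst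
  if state_topics = [] then none
  else
    let preferred0 := state_topics.filter (fun t => PySem.Str.isIn "/dsr01/" t)
    let preferred := if preferred0 = [] then state_topics else preferred0
    let canonical := preferred.filter (fun t => PySem.Str.endswith t "/state")
    PySem.List.pyGet?
      (PySem.List.sorted (if canonical = [] then preferred else canonical) (fun x => x) false) 0

-- ===== PORT B =====
-- literal port of Source B's _better (Python tuple '<' written out as the explicit lexicographic test it is)
def pvBetter (t best : String) : Bool :=
  let pt := PySem.Str.isIn "/dsr01/" t
  let pb := PySem.Str.isIn "/dsr01/" best
  if pt ≠ pb then pt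
  else
    let ct := PySem.Str.endswith t "/state"
    let cb := PySem.Str.endswith best "/state"
    if ct ≠ cb then ct
    else decide (t < best)

def select_state_topic_py_alt (topic_map : List (String × List String)) : Option String :=
  (PySem.Dict.ofList topic_map).items.foldl
    (fun best p =>
      if p.2.contains "dsr_msgs2/msg/RobotState"
          && (match best with | none => true | some b => pvBetter p.1 b)
      then some p.1 else best)
    none

-- ===== PRECONDITION & SPEC =====
def Spec_select_state_topic_py (topic_map : List (String × List String)) (out : Option String) : Prop := out = select_state_topic_py_alt topic_map
instance (topic_map : List (String × List String)) (out : Option String) : Decidable (Spec_select_state_topic_py topic_map out) := by unfold Spec_select_state_topic_py; infer_instance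

-- ===== CLAIM (what is proved, stated in full; the proofs are below) =====
def Claim_equal_select_state_topic_py : Prop := ∀ (topic_map : List (String × List String)), Dom_select_state_topic_py topic_map → Spec_select_state_topic_py topic_map (select_state_topic_py topic_map)

-- ===== LEMMAS AND PROOFS =====

-- B's loop body, restricted to the topics that survive the RobotState test
def pvStep (best : Option String) (t : String) : Option String :=
  if (match best with | none => true | some b => pvBetter t b) then some t else best

-- proof-side abbreviations for the two priority flags
def pvFlagP (t : String) : Bool := PySem.Str.isIn "/dsr01/" t
def pvFlagC (t : String) : Bool := PySem.Str.endswith t "/state"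

theorem pvBetter_def (t b : String) : pvBetter t b =
    (if pvFlagP t ≠ pvFlagP b then pvFlagP t
     else if pvFlagC t ≠ pvFlagC b then pvFlagC t
     else decide (t < b)) := rfl

theorem pvBetter_iff (t b : String) : pvBetter t b = true ↔
    ((pvFlagP t = true ∧ pvFlagP b = false) ∨
     (pvFlagP t = pvFlagP b ∧ pvFlagC t = true ∧ pvFlagC b = false) ∨
     (pvFlagP t = pvFlagP b ∧ pvFlagC t = pvFlagC b ∧ t < b)) := by
  rw [pvBetter_def]
  cases hpa : pvFlagP t <;> cases hpb : pvFlagP b <;>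
    cases hca : pvFlagC t <;> cases hcb : pvFlagC b <;> simp

theorem pvBetter_irrefl (a : String) : pvBetter a a = false := by
  rw [pvBetter_def]; simp

theorem pvBetter_connex {a b : String}
    (h1 : pvBetter a b = false) (h2 : pvBetter b a = false) : a = b := by
  have hn1 : ¬ _ := fun h => by rw [(pvBetter_iff a b).mpr h] at h1; exact Bool.true_eq_false.mp h1
  have hn2 : ¬ _ := fun h => by rw [(pvBetter_iff b a).mpr h] at h2; exact Bool.true_eq_false.mp h2
  push_neg at hn1 hn2
  cases hpa : pvFlagP a <;> cases hpb : pvFlagP b <;>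
    cases hca : pvFlagC a <;> cases hcb : pvFlagC b <;> simp_all <;>
    exact String.toList_inj.mp (le_antisymm hn2 hn1)

theorem pvBetter_trans {a b c : String}
    (h1 : pvBetter a b = true) (h2 : pvBetter b c = true) : pvBetter a c = true := by
  rw [pvBetter_iff] at h1 h2 ⊢
  cases hpa : pvFlagP a <;> cases hpb : pvFlagP b <;> cases hpc : pvFlagP c <;>
    cases hca : pvFlagC a <;> cases hcb : pvFlagC b <;> cases hcc : pvFlagC c <;>
    simp_all <;> exact lt_trans h1 h2

theorem pvBetter_neg_trans {a b c : String}
    (h1 : pvBetter a b = false) (h2 : pvBetter b c = false) : pvBetter a c = false := by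
  by_contra h
  have hac : pvBetter a c = true := by simpa using h
  cases hba : pvBetter b a with
  | true => have := pvBetter_trans hba hac; simp_all
  | false =>
      have hab := pvBetter_connex h1 hba
      subst hab; simp_all

theorem pvStep_some (b t : String) :
    pvStep (some b) t = some (if pvBetter t b then t else b) := by
  simp only [pvStep]; split_ifs <;> simp_all

-- the fold computes a member that nothing in the list (nor the seed) beats
theorem pvStep_foldl_min (L : List String) :
    ∀ b : String, ∃ m, L.foldl pvStep (some b) = some m ∧ m ∈ b :: L ∧
      ∀ t ∈ b :: L, pvBetter t m = false := by
  induction L with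
  | nil =>
      intro b
      exact ⟨b, rfl, by simp, by simp [pvBetter_irrefl]⟩
  | cons t r ih =>
      intro b
      obtain ⟨m, hm, hmem, hmin⟩ := ih (if pvBetter t b then t else b)
      refine ⟨m, ?_, ?_, ?_⟩
      · simpa [pvStep_some] using hm
      · simp only [List.mem_cons] at hmem ⊢
        rcases hmem with h | h
        · split at h <;> subst h <;> simp
        · simp [h]
      · intro x hx
        have hb' : pvBetter (if pvBetter t b then t else b) m = false :=
          hmin _ (by simp)
        simp only [List.mem_cons] at hx
        rcases hx with hx | hx | hx
        · rw [hx]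
          cases htb : pvBetter t b with
          | true => -- running best after t is t; b lost to t
              rw [if_pos htb] at hb'
              cases hbm : pvBetter b m with
              | true => have := pvBetter_trans htb hbm; simp_all
              | false => rfl
          | false => rw [if_neg (by simp [htb])] at hb'; exact hb'
        · rw [hx]
          cases htb : pvBetter t b with
          | true => rw [if_pos htb] at hb'; exact hb'
          | false =>
              rw [if_neg (by simp [htb])] at hb'
              exact pvBetter_neg_trans htb hb'
        · exact hmin _ (by simp [hx])

-- B's fold over the items equals the same fold over A's state_topics list
theorem pvAlt_eq_fold (topic_map : List (String × List String)) :
    select_state_topic_py_alt topic_map =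
      (((PySem.Dict.ofList topic_map).items.filter
          (fun p => p.2.contains "dsr_msgs2/msg/RobotState")).map Prod.fst).foldl pvStep none := by
  unfold select_state_topic_py_alt
  rw [List.foldl_map, List.foldl_filter]
  apply PySem.List.foldl_congr_mem
  intro best p _
  by_cases h : "dsr_msgs2/msg/RobotState" ∈ p.2 <;> simp [pvStep, h]

-- A's staged selection returns a member of state_topics that nothing beats
theorem pvA_min (L : List String) (hL : L ≠ []) :
    ∃ m,
      (let preferred0 := L.filter (fun t => PySem.Str.isIn "/dsr01/" t)
       let preferred := if preferred0 = [] then L else preferred0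
       let canonical := preferred.filter (fun t => PySem.Str.endswith t "/state")
       PySem.List.pyGet?
        (PySem.List.sorted (if canonical = [] then preferred else canonical) (fun x => x) false) 0)
        = some m
      ∧ m ∈ L ∧ ∀ t ∈ L, pvBetter t m = false := by
  simp only []
  set P0 := L.filter (fun t => PySem.Str.isIn "/dsr01/" t) with hP0
  set P : List String := if P0 = [] then L else P0 with hP
  set C := P.filter (fun t => PySem.Str.endswith t "/state") with hC
  set F : List String := if C = [] then P else C with hF
  have hPne : P ≠ [] := by
    rw [hP]; split <;> simp_all
  have hFne : F ≠ [] := by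
    rw [hF]; split <;> simp_all
  have hFP : ∀ x ∈ F, x ∈ P := by
    intro x hx; rw [hF] at hx
    split at hx
    · exact hx
    · exact List.mem_of_mem_filter hx
  have hPL : ∀ x ∈ P, x ∈ L := by
    intro x hx; rw [hP] at hx
    split at hx
    · exact hx
    · exact List.mem_of_mem_filter hx
  obtain ⟨m, rest, hsort⟩ :
      ∃ m rest, PySem.List.sorted F (fun x => x) false = m :: rest := by
    cases hs : PySem.List.sorted F (fun x => x) false with
    | nil => exact absurd ((PySem.List.sorted_eq_nil_iff _ _ _).mp hs) hFne
    | cons a l => exact ⟨a, l, rfl⟩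
  have hmF : m ∈ F := by
    rw [← PySem.List.mem_sorted F (fun x => x) false m, hsort]; simp
  have hmle : ∀ y ∈ F, m ≤ y := PySem.List.key_head_sorted_le F (fun x => x) hsort
  refine ⟨m, ?_, hPL _ (hFP _ hmF), ?_⟩
  · rw [hsort]; simp [PySem.List.pyGet?, PySem.List.pyIdx?]
  intro t htL
  -- compare the two priority flags, then fall back to the string order on F
  by_cases hpt : PySem.Str.isIn "/dsr01/" t = PySem.Str.isIn "/dsr01/" m
  · by_cases hct : PySem.Str.endswith t "/state" = PySem.Str.endswith m "/state"
    · -- same flags: t lies in F alongside m, so the sorted head is ≤ t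
      have htP : t ∈ P := by
        rw [hP]; split
        · exact htL
        · rw [hP0]
          refine List.mem_filter.mpr ⟨htL, ?_⟩
          have hmP := hFP _ hmF
          rw [hP] at hmP
          rw [if_neg ‹¬ P0 = []›] at hmP
          rw [hP0] at hmP
          rw [hpt]
          exact (List.mem_filter.mp hmP).2
      have htF : t ∈ F := by
        rw [hF]; split
        · exact htP
        · rw [hC]
          refine List.mem_filter.mpr ⟨htP, ?_⟩
          have hmC : m ∈ C := by
            have h := hmF; rw [hF, if_neg ‹¬ C = []›] at h; exact h
          rw [hC] at hmC
          rw [hct]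
          exact (List.mem_filter.mp hmC).2
      have hle := hmle t htF
      simp only [pvBetter_def, pvFlagP, pvFlagC]
      rw [if_neg (not_ne_iff.mpr hpt), if_neg (not_ne_iff.mpr hct)]
      exact decide_eq_false (not_lt.mpr hle)
    · -- '/state' flags differ: t must be the one without the suffix
      have hctf : PySem.Str.endswith t "/state" = false := by
        by_contra h
        have hct' : PySem.Str.endswith t "/state" = true := by simpa using h
        have htP : t ∈ P := by
          rw [hP]; split
          · exact htL
          · rw [hP0]
            refine List.mem_filter.mpr ⟨htL, ?_⟩
            have hmP := hFP _ hmF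
            rw [hP] at hmP
            rw [if_neg ‹¬ P0 = []›] at hmP
            rw [hP0] at hmP
            rw [hpt]
            exact (List.mem_filter.mp hmP).2
        have hCne : C ≠ [] := by
          rw [hC]
          intro hnil
          exact List.filter_eq_nil_iff.mp hnil t htP hct'
        have hmC : m ∈ C := by
          have h := hmF; rw [hF, if_neg hCne] at h; exact h
        rw [hC] at hmC
        exact hct (hct'.trans ((List.mem_filter.mp hmC).2).symm)
      simp only [pvBetter_def, pvFlagP, pvFlagC]
      rw [if_neg (not_ne_iff.mpr hpt), if_pos hct]
      exact hctf
  · -- robot-id flags differ: t must be the one without the marker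
    have hptf : PySem.Str.isIn "/dsr01/" t = false := by
      by_contra h
      have hpt' : PySem.Str.isIn "/dsr01/" t = true := by simpa using h
      have hPne0 : P0 ≠ [] := by
        rw [hP0]
        intro hnil
        exact List.filter_eq_nil_iff.mp hnil t htL hpt'
      have hmP : m ∈ P := hFP _ hmF
      rw [hP, if_neg hPne0, hP0] at hmP
      exact hpt (hpt'.trans ((List.mem_filter.mp hmP).2).symm)
    simp only [pvBetter_def, pvFlagP, pvFlagC]
    rw [if_pos hpt]
    exact hptf

-- ===== VERDICT (by name: the statement is the Claim_ definition above) =====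
theorem select_state_topic_py_spec : Claim_equal_select_state_topic_py := by
  intro topic_map _
  unfold Spec_select_state_topic_py
  rw [pvAlt_eq_fold]
  simp only [select_state_topic_py]
  set L := ((PySem.Dict.ofList topic_map).items.filter
      (fun p => p.2.contains "dsr_msgs2/msg/RobotState")).map Prod.fst with hLdef
  by_cases hL : L = []
  · simp [hL]
  · rw [if_neg hL]
    obtain ⟨mA, hA, hmAL, hminA⟩ := pvA_min L hL
    rw [hA]
    cases hLc : L with
    | nil => exact absurd hLc hL
    | cons t r =>
        have hstep : pvStep none t = some t := by simp [pvStep]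
        obtain ⟨mB, hB, hmBL, hminB⟩ := pvStep_foldl_min r t
        rw [List.foldl_cons, hstep, hB]
        have h1 : pvBetter mA mB = false := hminB _ (by rw [← hLc]; exact hmAL)
        have h2 : pvBetter mB mA = false := hminA _ (by rw [hLc]; exact hmBL)
        rw [pvBetter_connex h1 h2]
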